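-- pv_equiv track=rewrite | github.com/meiraxx/cs-thesis | netmeter/netmeter-tool.py | build_l3_uniflows
-- ===== SOURCE A (Python) =====
-- def build_l3_uniflows(packets):
--     """Associate layer-3 uniflow ids to packets"""
--     l3_uniflows = dict()
--     l3_uniflow_ids = list()
--     for packet in packets:
--         flow_id = tuple(packet[0])
--         try:
--             l3_uniflows[flow_id].append(packet)
--         except KeyError:
--             l3_uniflow_ids.append(flow_id)
--             l3_uniflows[flow_id] = [packet]
--
--     return l3_uniflows, l3_uniflow_ids
-- ===== SOURCE B (Python) =====
-- def build_l3_uniflows(packets):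
--     """Associate layer-3 uniflow ids to packets"""
--     flow_keys = [tuple(p[0]) for p in packets]
--     l3_uniflow_ids = list(dict.fromkeys(flow_keys))
--     l3_uniflows = {fid: [p for p, k in zip(packets, flow_keys) if k == fid]
--                    for fid in l3_uniflow_ids}
--     return l3_uniflows, l3_uniflow_ids
-- ===== Notes on version B (the rewrite author's own statement) =====
-- stated objective: alternative
-- what changed: B has no incremental grouping loop at all: it runs three staged passes - extract all flow keys, ordered-dedup them with dict.fromkeys, then build each group by filtering the packet list per unique id - instead of A's single pass maintaining a dict and an id list via try/except.
import Mathlib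
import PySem

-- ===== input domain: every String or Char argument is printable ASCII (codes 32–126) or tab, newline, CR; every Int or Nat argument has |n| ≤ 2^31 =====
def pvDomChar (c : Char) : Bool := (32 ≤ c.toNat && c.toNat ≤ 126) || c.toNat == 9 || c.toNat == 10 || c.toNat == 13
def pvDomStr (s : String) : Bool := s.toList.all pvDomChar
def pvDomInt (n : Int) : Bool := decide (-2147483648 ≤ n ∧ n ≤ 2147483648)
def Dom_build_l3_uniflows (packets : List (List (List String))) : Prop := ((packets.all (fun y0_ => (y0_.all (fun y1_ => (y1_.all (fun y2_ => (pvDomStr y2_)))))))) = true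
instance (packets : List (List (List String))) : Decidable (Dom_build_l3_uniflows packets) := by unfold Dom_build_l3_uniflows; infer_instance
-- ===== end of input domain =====

-- B replaces A's single try/except grouping loop by three staged passes: extract the
-- flow-key list, ordered-dedup it, then build each group by filtering the packets per id.


-- ===== PORT A =====
-- A: for each packet, flow_id = tuple(packet[0]); try append to l3_uniflows[flow_id],
-- on KeyError record the new id and start a fresh list. packet[0] ported with pyGet?
-- (Pre_ guarantees packets are nonempty, so .getD [] is never taken).
def build_l3_uniflows (packets : List (List (List String))) : (List (List String × List (List (List String)))) × List (List String) :=
  let st := packets.foldl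
    (fun (st : PySem.Dict (List String) (List (List (List String))) × List (List String)) packet =>
      let flow_id := (PySem.List.pyGet? packet 0).getD []
      match st.1.get? flow_id with
      | some cur => (st.1.insert flow_id (cur ++ [packet]), st.2)
      | none => (st.1.insert flow_id [packet], st.2 ++ [flow_id]))
    (PySem.Dict.empty, [])
  (st.1.items, st.2)

-- ===== PORT B =====
-- B: flow_keys = [tuple(p[0]) for p in packets]; ids = list(dict.fromkeys(flow_keys))
-- (= PySem.List.dedup); dict comprehension filtering zip(packets, flow_keys) per id.
def build_l3_uniflows_alt (packets : List (List (List String))) : (List (List String × List (List (List String)))) × List (List String) :=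
  let flow_keys := packets.map (fun p => (PySem.List.pyGet? p 0).getD [])
  let ids := PySem.List.dedup flow_keys
  (ids.map (fun fid =>
      (fid, ((packets.zip flow_keys).filter (fun pk => pk.2 == fid)).map (·.1))),
   ids)

-- ===== PRECONDITION & SPEC =====
-- Pre_ excludes exactly the inputs where A raises IndexError (a packet that is the
-- empty list, so packet[0] does not exist); B raises there too.
def Pre_build_l3_uniflows (packets : List (List (List String))) : Prop :=
  ∀ p ∈ packets, p ≠ []
instance (packets : List (List (List String))) : Decidable (Pre_build_l3_uniflows packets) := by unfold Pre_build_l3_uniflows; infer_instance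
def pvWitness_build_l3_uniflows : List (List (List String)) :=
  [[["a"], ["x"]], [["b"]], [["a"], ["y"]]]
def Spec_build_l3_uniflows (packets : List (List (List String))) (out : (List (List String × List (List (List String)))) × List (List String)) : Prop := out = build_l3_uniflows_alt packets
instance (packets : List (List (List String))) (out : (List (List String × List (List (List String)))) × List (List String)) : Decidable (Spec_build_l3_uniflows packets out) := by unfold Spec_build_l3_uniflows; infer_instance

-- ===== CLAIM (what is proved, stated in full; the proofs are below) =====
def Claim_equal_build_l3_uniflows : Prop := ∀ (packets : List (List (List String))), Dom_build_l3_uniflows packets → Pre_build_l3_uniflows packets → Spec_build_l3_uniflows packets (build_l3_uniflows packets)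

-- ===== LEMMAS AND PROOFS =====
-- A's paired loop, started from (d, d.keys), equals the plain modify-grouping fold
-- paired with its own keys (A's two branches are both 'modify flow_id [] (· ++ [packet])').
theorem build_l3_uniflows_loop (packets : List (List (List String)))
    (d : PySem.Dict (List String) (List (List (List String)))) (ids : List (List String))
    (h : ids = d.keys) :
    packets.foldl
      (fun (st : PySem.Dict (List String) (List (List (List String))) × List (List String)) packet =>
        let flow_id := (PySem.List.pyGet? packet 0).getD []
        match st.1.get? flow_id with
        | some cur => (st.1.insert flow_id (cur ++ [packet]), st.2)
        | none => (st.1.insert flow_id [packet], st.2 ++ [flow_id]))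
      (d, ids)
    = (let d' := packets.foldl
        (fun (d : PySem.Dict (List String) (List (List (List String)))) packet =>
          d.modify ((PySem.List.pyGet? packet 0).getD []) [] (· ++ [packet]))
        d
       (d', d'.keys)) := by
  induction packets generalizing d ids with
  | nil => simpa using h
  | cons packet rest ih =>
    simp only [List.foldl_cons]
    set k := (PySem.List.pyGet? packet 0).getD [] with hk
    have hmod : d.modify k [] (· ++ [packet]) = d.insert k (d.getD k [] ++ [packet]) := rfl
    rcases hg : d.get? k with _ | cur
    · have hc : d.contains k = false := by
        have := PySem.Dict.get?_eq_none_iff_contains (d := d) (k := k)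
        simpa [hg] using this.mp hg
      have hkeys : (d.insert k [packet]).keys = d.keys ++ [k] :=
        PySem.Dict.keys_insert_of_not_contains d [packet] hc
      have hD : d.getD k [] = [] := PySem.Dict.getD_of_get?_eq_none d [] hg
      rw [ih (d.insert k [packet]) (ids ++ [k]) (by rw [h, hkeys])]
      rw [hmod, hD]
      simp
    · have hD : d.getD k [] = cur := PySem.Dict.getD_of_get?_eq_some d [] hg
      rw [ih (d.insert k (cur ++ [packet])) ids
        (by
          have hc : d.contains k = true := by
            rcases hb : d.contains k with _ | _
            · exact absurd ((PySem.Dict.get?_eq_none_iff_contains (d := d) (k := k)).mpr hb) (by simp [hg])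
            · rfl
          rw [h, PySem.Dict.keys_insert_of_contains d (cur ++ [packet]) hc])]
      rw [hmod, hD]

-- ===== VERDICT (by name: the statement is the Claim_ definition above) =====
theorem build_l3_uniflows_spec : Claim_equal_build_l3_uniflows := by
  intro packets _ _
  unfold Spec_build_l3_uniflows build_l3_uniflows build_l3_uniflows_alt
  rw [build_l3_uniflows_loop packets PySem.Dict.empty [] (by simp [PySem.Dict.keys_empty])]
  -- the modify-fold over packets, rewritten as a fold over (key, packet) pairs
  set key : List (List String) → List String := fun p => (PySem.List.pyGet? p 0).getD [] with hkey
  set dA := packets.foldl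
    (fun (d : PySem.Dict (List String) (List (List (List String)))) packet =>
      d.modify (key packet) [] (· ++ [packet])) PySem.Dict.empty with hdA
  have hfold : dA = (packets.map (fun p => (key p, p))).foldl
      (fun (d : PySem.Dict (List String) (List (List (List String)))) q =>
        d.modify q.1 [] (· ++ [q.2])) PySem.Dict.empty := by
    rw [List.foldl_map]
  have hnd : dA.keys.Nodup := by
    rw [hdA]
    exact PySem.Dict.nodup_keys_foldl_modify_key packets key [] _ PySem.Dict.empty
      (by simp [PySem.Dict.keys_empty])
  have hkeys : dA.keys = PySem.List.dedup (packets.map key) := by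
    rw [hdA, PySem.Dict.keys_foldl_modify_key, PySem.Dict.keys_empty,
      PySem.Set.update_nil_left, PySem.List.dedup_eq_ofList]
  have hgetD : ∀ c, dA.getD c [] = (packets.filter (fun p => key p == c)) := by
    intro c
    rw [hfold, PySem.Dict.getD_foldl_modify_append, PySem.Dict.getD_empty]
    simp [List.filter_map, Function.comp_def]
  have hzip : packets.zip (packets.map key) = packets.map (fun p => (p, key p)) := by
    simpa using List.zip_map' (f := id) (g := key) (l := packets)
  show (dA.items, dA.keys)
      = ((PySem.List.dedup (packets.map key)).map (fun fid =>
          (fid, ((packets.zip (packets.map key)).filter (fun pk => pk.2 == fid)).map (·.1))),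
         PySem.List.dedup (packets.map key))
  rw [PySem.Dict.items_eq_map_keys dA hnd [], hkeys, hzip]
  refine congrArg (fun x => (x, _)) ?_
  refine List.map_congr_left (fun fid _ => ?_)
  rw [hgetD fid]
  simp [List.filter_map, Function.comp_def]
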